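-- pv_equiv track=rewrite | github.com/hamedrab/FOREC | src/utils.py | get_run_mf
-- ===== SOURCE A (Python) =====
-- def get_run_mf(rec_list, unq_users):
--     ranking = {}
--     for cuser in unq_users:
--         user_ratings = [x for x in rec_list if x[0]==cuser]
--         user_ratings.sort(key=lambda x:x[2], reverse=True)
--         ranking[cuser] = user_ratings
--
--     run_mf = {}
--     for k, v in ranking.items():
--         cur_rank = {}
--         for item in v:
--             cur_rank[str(item[1])]= 2+item[2]
--         run_mf[str(k)] = cur_rank
--     return run_mf
-- ===== SOURCE B (Python) =====
-- def get_run_mf(rec_list, unq_users):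
--     users = set(unq_users)
--     run_mf = {str(u): {} for u in unq_users}
--     for item in sorted(rec_list, key=lambda x: x[2], reverse=True):
--         if item[0] in users:
--             run_mf[str(item[0])][str(item[1])] = 2 + item[2]
--     return run_mf
-- ===== Notes on version B (the rewrite author's own statement) =====
-- stated objective: faster
-- what changed: B replaces A's per-user pass (filter rec_list for each user, then sort each user's slice) by ONE stable descending sort of the whole rec_list followed by a single guarded linear pass that fills a pre-initialised per-user dict; stability of the global sort makes each user's insertion order identical to A's.
import Mathlib
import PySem

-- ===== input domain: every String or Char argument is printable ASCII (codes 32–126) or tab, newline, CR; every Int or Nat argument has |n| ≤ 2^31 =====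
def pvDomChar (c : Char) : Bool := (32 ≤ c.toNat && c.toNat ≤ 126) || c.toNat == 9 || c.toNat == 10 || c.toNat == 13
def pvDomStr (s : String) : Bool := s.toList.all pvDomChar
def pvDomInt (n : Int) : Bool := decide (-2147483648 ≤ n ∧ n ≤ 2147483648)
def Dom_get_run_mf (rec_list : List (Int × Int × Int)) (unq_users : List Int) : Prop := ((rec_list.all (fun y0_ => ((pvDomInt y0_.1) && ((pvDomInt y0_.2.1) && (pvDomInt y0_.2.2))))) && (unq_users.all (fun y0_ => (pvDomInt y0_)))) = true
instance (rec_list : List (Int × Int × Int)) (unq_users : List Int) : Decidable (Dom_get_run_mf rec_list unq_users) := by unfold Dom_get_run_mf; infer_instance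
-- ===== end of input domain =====

-- B sorts the WHOLE rec_list once (stable, descending by score) and then fills a pre-initialised
-- per-user dict in one guarded linear pass, instead of A's per-user filter of rec_list plus a
-- per-user sort; same return value.

-- ===== PORT A =====
def get_run_mf (rec_list : List (Int × Int × Int)) (unq_users : List Int) : List (String × List (String × Int)) :=
  let ranking : PySem.Dict Int (List (Int × Int × Int)) :=
    unq_users.foldl (fun d cuser =>
      d.insert cuser
        (PySem.List.sorted (rec_list.filter (fun x => x.1 == cuser)) (fun x => x.2.2) true))
      PySem.Dict.empty
  let run_mf : PySem.Dict String (PySem.Dict String Int) :=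
    ranking.items.foldl (fun d kv =>
      d.insert (PySem.Int.toStr kv.1)
        (kv.2.foldl (fun cr item => cr.insert (PySem.Int.toStr item.2.1) (2 + item.2.2))
          PySem.Dict.empty))
      PySem.Dict.empty
  run_mf.items.map (fun p => (p.1, p.2.items))

-- ===== PORT B =====
def get_run_mf_alt (rec_list : List (Int × Int × Int)) (unq_users : List Int) : List (String × List (String × Int)) :=
  let users : PySem.Set Int := PySem.Set.ofList unq_users
  let init : PySem.Dict String (PySem.Dict String Int) :=
    unq_users.foldl (fun d u => d.insert (PySem.Int.toStr u) PySem.Dict.empty) PySem.Dict.empty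
  let run_mf : PySem.Dict String (PySem.Dict String Int) :=
    (PySem.List.sorted rec_list (fun x => x.2.2) true).foldl
      (fun d item =>
        if PySem.Set.contains users item.1 then
          -- run_mf[str(item[0])][str(item[1])] = 2+item[2]; the key str(item[0]) is always present here
          d.modify (PySem.Int.toStr item.1) PySem.Dict.empty
            (fun inner => inner.insert (PySem.Int.toStr item.2.1) (2 + item.2.2))
        else d)
      init
  run_mf.items.map (fun p => (p.1, p.2.items))

-- ===== PRECONDITION & SPEC =====
def Spec_get_run_mf (rec_list : List (Int × Int × Int)) (unq_users : List Int) (out : List (String × List (String × Int))) : Prop := out = get_run_mf_alt rec_list unq_users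
instance (rec_list : List (Int × Int × Int)) (unq_users : List Int) (out : List (String × List (String × Int))) : Decidable (Spec_get_run_mf rec_list unq_users out) := by unfold Spec_get_run_mf; infer_instance

-- ===== CLAIM (what is proved, stated in full; the proofs are below) =====
def Claim_equal_get_run_mf : Prop := ∀ (rec_list : List (Int × Int × Int)) (unq_users : List Int), Dom_get_run_mf rec_list unq_users → Spec_get_run_mf rec_list unq_users (get_run_mf rec_list unq_users)

-- ===== LEMMAS AND PROOFS =====

-- the sorted per-user rating list A hands to its inner dict loop
def pvSort (rec_list : List (Int × Int × Int)) (u : Int) : List (Int × Int × Int) :=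
  PySem.List.sorted (rec_list.filter (fun x => x.1 == u)) (fun x => x.2.2) true

-- the inner dict built from a per-user rating list
def pvInner (v : List (Int × Int × Int)) : PySem.Dict String Int :=
  v.foldl (fun cr item => cr.insert (PySem.Int.toStr item.2.1) (2 + item.2.2)) PySem.Dict.empty

-- injectivity of str(n) on Int, needed because both dicts are keyed by str(user)
lemma pv_digitChar_inj {a b : Nat} (ha : a < 10) (hb : b < 10)
    (h : Nat.digitChar a = Nat.digitChar b) : a = b := by
  interval_cases a <;> interval_cases b <;> revert h <;> decide

lemma pv_digitChar_ne_dash {a : Nat} (ha : a < 10) : Nat.digitChar a ≠ '-' := by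
  interval_cases a <;> decide

lemma pv_map_digitChar_inj : ∀ (l1 l2 : List Nat), (∀ x ∈ l1, x < 10) → (∀ x ∈ l2, x < 10) →
    l1.map Nat.digitChar = l2.map Nat.digitChar → l1 = l2 := by
  intro l1
  induction l1 with
  | nil => intro l2 _ _ h; cases l2 <;> simp_all
  | cons x xs ih =>
    intro l2 h1 h2 h
    cases l2 with
    | nil => simp_all
    | cons y ys =>
      simp only [List.map_cons, List.cons.injEq] at h
      have hx : x = y := pv_digitChar_inj (h1 x (by simp)) (h2 y (by simp)) h.1
      have := ih ys (fun z hz => h1 z (by simp [hz])) (fun z hz => h2 z (by simp [hz])) h.2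
      simp [hx, this]

lemma pv_toDigitsCore_eq : ∀ (fuel n : Nat) (ds : List Char), 0 < n → n < fuel →
    Nat.toDigitsCore 10 fuel n ds = ((Nat.digits 10 n).map Nat.digitChar).reverse ++ ds := by
  intro fuel
  induction fuel with
  | zero => intro n ds _ h; omega
  | succ fuel ih =>
    intro n ds hn hlt
    rw [Nat.toDigitsCore]
    by_cases h0 : n / 10 = 0
    · simp only [h0]
      rw [Nat.digits_def' (by norm_num : 1 < 10) hn, h0, Nat.digits_zero]
      simp
    · rw [if_neg h0]
      rw [ih (n / 10) _ (Nat.pos_of_ne_zero h0)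
        (by have := Nat.div_lt_self hn (by norm_num : 1 < 10); omega)]
      rw [Nat.digits_def' (by norm_num : 1 < 10) hn]
      simp [List.append_assoc]

lemma pv_toDigits_eq (n : Nat) (h : 0 < n) :
    Nat.toDigits 10 n = ((Nat.digits 10 n).map Nat.digitChar).reverse := by
  rw [Nat.toDigits, pv_toDigitsCore_eq (n + 1) n [] h (by omega)]
  simp

lemma pv_toDigits10_inj {a b : Nat} (h : Nat.toDigits 10 a = Nat.toDigits 10 b) : a = b := by
  rcases Nat.eq_zero_or_pos a with ha | ha <;> rcases Nat.eq_zero_or_pos b with hb | hb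
  · omega
  · exfalso
    subst ha
    rw [pv_toDigits_eq b hb] at h
    have h' : (Nat.digits 10 b).map Nat.digitChar = ['0'] := by
      have := congrArg List.reverse h
      simpa using this.symm
    have hd : Nat.digits 10 b = [0] :=
      pv_map_digitChar_inj _ _ (fun x hx => Nat.digits_lt_base (by norm_num) hx)
        (by simp) h'
    have := Nat.ofDigits_digits 10 b
    rw [hd] at this
    simp [Nat.ofDigits] at this
    omega
  · exfalso
    subst hb
    rw [pv_toDigits_eq a ha] at h
    have h' : (Nat.digits 10 a).map Nat.digitChar = ['0'] := by
      have := congrArg List.reverse h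
      simpa using this
    have hd : Nat.digits 10 a = [0] :=
      pv_map_digitChar_inj _ _ (fun x hx => Nat.digits_lt_base (by norm_num) hx)
        (by simp) h'
    have := Nat.ofDigits_digits 10 a
    rw [hd] at this
    simp [Nat.ofDigits] at this
    omega
  · rw [pv_toDigits_eq a ha, pv_toDigits_eq b hb] at h
    have h' := List.reverse_injective h
    have hd : Nat.digits 10 a = Nat.digits 10 b :=
      pv_map_digitChar_inj _ _ (fun x hx => Nat.digits_lt_base (by norm_num) hx)
        (fun x hx => Nat.digits_lt_base (by norm_num) hx) h'
    have h1 := Nat.ofDigits_digits 10 a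
    have h2 := Nat.ofDigits_digits 10 b
    rw [hd] at h1
    omega

lemma pv_dash_not_mem_toDigits (n : Nat) : '-' ∉ Nat.toDigits 10 n := by
  rcases Nat.eq_zero_or_pos n with h | h
  · subst h; decide
  · rw [pv_toDigits_eq n h]
    simp only [List.mem_reverse, List.mem_map]
    rintro ⟨d, hd, hc⟩
    exact pv_digitChar_ne_dash (Nat.digits_lt_base (by norm_num) hd) hc

lemma pv_toChars_inj {a b : Int} (h : PySem.Int.toChars a = PySem.Int.toChars b) : a = b := by
  unfold PySem.Int.toChars at h
  by_cases ha : a < 0 <;> by_cases hb : b < 0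
  · rw [if_pos ha, if_pos hb] at h
    simp only [List.cons.injEq, true_and] at h
    have := pv_toDigits10_inj h
    omega
  · rw [if_pos ha, if_neg hb] at h
    exact absurd (h ▸ List.mem_cons_self) (pv_dash_not_mem_toDigits b.toNat)
  · rw [if_neg ha, if_pos hb] at h
    exact absurd (h.symm ▸ List.mem_cons_self) (pv_dash_not_mem_toDigits a.toNat)
  · rw [if_neg ha, if_neg hb] at h
    have := pv_toDigits10_inj h
    omega

lemma pv_toStr_inj {a b : Int} (h : PySem.Int.toStr a = PySem.Int.toStr b) : a = b := by
  have := congrArg String.toList h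
  rw [PySem.Int.toList_toStr, PySem.Int.toList_toStr] at this
  exact pv_toChars_inj this

-- a fold of key-determined inserts builds the dict of the FIRST occurrences, in order
lemma pv_foldl_insert_items {κ V : Type} [BEq κ] [LawfulBEq κ] [DecidableEq κ]
    (k : Int → κ) (hk : ∀ a b : Int, k a = k b → a = b) (F : Int → V) :
    ∀ (l S : List Int) (d : PySem.Dict κ V), S.Nodup →
      d.items = S.map (fun u => (k u, F u)) →
      (l.foldl (fun d u => d.insert (k u) (F u)) d).items
        = (PySem.Set.update S l).map (fun u => (k u, F u)) := by
  intro l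
  induction l with
  | nil =>
    intro S d _ hd
    simpa [PySem.Set.update] using hd
  | cons u rest ih =>
    intro S d hS hd
    simp only [List.foldl_cons]
    rw [PySem.Set.update_cons]
    have hkeys : d.keys = S.map k := by
      simp only [PySem.Dict.keys, hd, List.map_map]
      rfl
    by_cases hu : u ∈ S
    · rw [PySem.Set.add_of_mem hu]
      apply ih S _ hS
      have hcont : d.contains (k u) = true := by
        rw [PySem.Dict.contains_eq_decide_mem_keys, hkeys]
        simp only [decide_eq_true_eq, List.mem_map]
        exact ⟨u, hu, rfl⟩
      rw [PySem.Dict.items_insert, hcont, if_pos rfl, hd, List.map_map]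
      apply List.map_congr_left
      intro w hw
      simp only [Function.comp]
      by_cases hwu : k w == k u
      · have : w = u := hk _ _ (by simpa using hwu)
        simp [this]
      · simp [hwu]
    · rw [PySem.Set.add_of_not_mem hu]
      apply ih (S ++ [u]) _
        (List.Nodup.append hS (List.nodup_singleton u)
          (fun {a} ha hb => hu (List.mem_singleton.mp hb ▸ ha)))
      have hcont : d.contains (k u) = false := by
        rw [PySem.Dict.contains_eq_decide_mem_keys, hkeys]
        simp only [decide_eq_false_iff_not, List.mem_map, not_exists]
        rintro w ⟨hw, hww⟩
        exact hu (hk _ _ hww ▸ hw)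
      rw [PySem.Dict.items_insert, hcont, if_neg (by simp), hd]
      simp

-- A's result in canonical form
lemma pv_A_eq (rec_list : List (Int × Int × Int)) (unq_users : List Int) :
    get_run_mf rec_list unq_users
      = (PySem.List.dedup unq_users).map
          (fun u => (PySem.Int.toStr u, (pvInner (pvSort rec_list u)).items)) := by
  simp only [get_run_mf]
  have hrank : (unq_users.foldl (fun d cuser =>
      d.insert cuser
        (PySem.List.sorted (rec_list.filter (fun x => x.1 == cuser)) (fun x => x.2.2) true))
      PySem.Dict.empty).items
      = (PySem.List.dedup unq_users).map (fun u => (u, pvSort rec_list u)) := by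
    have := pv_foldl_insert_items (fun u => u) (fun _ _ h => h) (pvSort rec_list)
      unq_users [] PySem.Dict.empty (by simp) (by simp [PySem.Dict.empty])
    simpa [PySem.Set.update_nil_left, pvSort] using this
  rw [hrank, List.foldl_map]
  have := pv_foldl_insert_items PySem.Int.toStr (fun _ _ h => pv_toStr_inj h)
    (fun u => pvInner (pvSort rec_list u))
    (PySem.List.dedup unq_users) [] PySem.Dict.empty (by simp) (by simp [PySem.Dict.empty])
  simp only [pvInner] at this
  rw [this, PySem.Set.update_nil_left]
  simp only [PySem.List.dedup_eq_ofList, PySem.Set.ofList_ofList]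
  simp [List.map_map, Function.comp_def, pvInner]

-- x is not kept by the filter: filtering the insertion is filtering the old list
lemma pv_insertBy_filter_neg {α : Type} (b : α → α → Bool) (p : α → Bool) (x : α)
    (hx : p x = false) :
    ∀ ys : List α, (PySem.List.insertBy b x ys).filter p = ys.filter p := by
  intro ys
  induction ys with
  | nil => simp [PySem.List.insertBy, hx]
  | cons y t ih =>
    simp only [PySem.List.insertBy]
    split_ifs with h
    · simp [hx]
    · by_cases hy : p y = true <;> simp [hy, ih]

-- x belongs before every element of l
lemma pv_insertBy_front {α : Type} (b : α → α → Bool) (x : α) :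
    ∀ l : List α, (∀ z ∈ l, b x z = true) → PySem.List.insertBy b x l = x :: l := by
  intro l hl
  cases l with
  | nil => rfl
  | cons z t => simp [PySem.List.insertBy, hl z (by simp)]

-- on a descending-sorted list, inserting and filtering commute (x kept by the filter)
lemma pv_insertBy_filter_pos {α : Type} (key : α → Int) (p : α → Bool) (x : α)
    (hx : p x = true) :
    ∀ ys : List α, ys.Pairwise (fun a c => key c ≤ key a) →
      (PySem.List.insertBy (fun a c => decide (key c < key a)) x ys).filter p
        = PySem.List.insertBy (fun a c => decide (key c < key a)) x (ys.filter p) := by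
  intro ys
  induction ys with
  | nil => simp [PySem.List.insertBy, hx]
  | cons y t ih =>
    intro hp
    rw [List.pairwise_cons] at hp
    by_cases hxy : key y < key x
    · by_cases hy : p y = true
      · simp [PySem.List.insertBy, hx, hy, hxy]
      · have hfront : PySem.List.insertBy (fun a c => decide (key c < key a)) x (t.filter p)
            = x :: t.filter p :=
          pv_insertBy_front _ _ _ (fun z hz => by
            simp only [decide_eq_true_eq]
            exact lt_of_le_of_lt (hp.1 z (List.mem_of_mem_filter hz)) hxy)
        simp [PySem.List.insertBy, hx, hy, hxy, hfront]
    · by_cases hy : p y = true <;>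
        simp [PySem.List.insertBy, hy, hxy, ih hp.2]

-- a stable descending sort commutes with filtering
lemma pv_sorted_filter {α : Type} (key : α → Int) (p : α → Bool) (xs : List α) :
    (PySem.List.sorted xs key true).filter p = PySem.List.sorted (xs.filter p) key true := by
  induction xs using List.reverseRecOn with
  | nil => rfl
  | append_singleton t x ih =>
    have hsc : ∀ (l : List α), PySem.List.sorted (l ++ [x]) key true
        = PySem.List.insertBy (fun a c => decide (key c < key a)) x
            (PySem.List.sorted l key true) := by
      intro l
      rw [PySem.List.sorted_rev_eq_foldl_insertBy (l ++ [x]), List.foldl_append,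
        List.foldl_cons, List.foldl_nil, ← PySem.List.sorted_rev_eq_foldl_insertBy]
    by_cases hx : p x = true
    · have hfx : (t ++ [x]).filter p = t.filter p ++ [x] := by
        simp [List.filter_append, hx]
      rw [hsc t, pv_insertBy_filter_pos key p x hx _ (PySem.List.sorted_pairwise_rev t key),
        ih, hfx, hsc (t.filter p)]
    · have hfx : (t ++ [x]).filter p = t.filter p := by
        simp [List.filter_append, hx]
      rw [hsc t, pv_insertBy_filter_neg _ p x (by simpa using hx), ih, hfx]

-- a fold of guarded nested-dict writes updates every user's inner dict in parallel
lemma pv_foldl_modify_items :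
    ∀ (l : List (Int × Int × Int)) (S : List Int) (G : Int → PySem.Dict String Int)
      (d : PySem.Dict String (PySem.Dict String Int)), S.Nodup →
      (∀ x ∈ l, x.1 ∈ S) →
      d.items = S.map (fun u => (PySem.Int.toStr u, G u)) →
      (l.foldl (fun d x => d.modify (PySem.Int.toStr x.1) PySem.Dict.empty
          (fun inner => inner.insert (PySem.Int.toStr x.2.1) (2 + x.2.2))) d).items
        = S.map (fun u => (PySem.Int.toStr u,
            (l.filter (fun x => x.1 == u)).foldl
              (fun inner x => inner.insert (PySem.Int.toStr x.2.1) (2 + x.2.2)) (G u))) := by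
  intro l
  induction l with
  | nil =>
    intro S G d _ _ hd
    simpa using hd
  | cons x t ih =>
    intro S G d hS hmem hd
    have hkeys : d.keys = S.map PySem.Int.toStr := by
      simp only [PySem.Dict.keys, hd, List.map_map]; rfl
    have hnk : d.keys.Nodup := by
      rw [hkeys]
      exact hS.map (fun a b h => pv_toStr_inj h)
    have hx1 : x.1 ∈ S := hmem x (by simp)
    have hgetD : d.getD (PySem.Int.toStr x.1) PySem.Dict.empty = G x.1 := by
      apply PySem.Dict.getD_of_mem_items d _ hnk
      rw [hd]
      exact List.mem_map.mpr ⟨x.1, hx1, rfl⟩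
    have hcont : d.contains (PySem.Int.toStr x.1) = true := by
      rw [PySem.Dict.contains_eq_decide_mem_keys, hkeys]
      simp only [decide_eq_true_eq, List.mem_map]
      exact ⟨x.1, hx1, rfl⟩
    rw [List.foldl_cons]
    have hstep : d.modify (PySem.Int.toStr x.1) PySem.Dict.empty
        (fun inner => inner.insert (PySem.Int.toStr x.2.1) (2 + x.2.2))
        = d.insert (PySem.Int.toStr x.1)
            ((G x.1).insert (PySem.Int.toStr x.2.1) (2 + x.2.2)) := by
      simp [PySem.Dict.modify, hgetD]
    rw [hstep]
    rw [ih S (fun u => if u = x.1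
        then (G x.1).insert (PySem.Int.toStr x.2.1) (2 + x.2.2) else G u) _ hS
      (fun z hz => hmem z (by simp [hz]))]
    · apply List.map_congr_left
      intro u hu
      by_cases hux : u = x.1
      · subst hux
        simp
      · simp only [hux, if_false]
        have : (x.1 == u) = false := by simpa using Ne.symm hux
        simp [this]
    · rw [PySem.Dict.items_insert_of_contains _ _ hcont, hd, List.map_map]
      apply List.map_congr_left
      intro w hw
      simp only [Function.comp]
      by_cases hwu : w = x.1
      · subst hwu; simp
      · have : (PySem.Int.toStr w == PySem.Int.toStr x.1) = false := by
          simp only [beq_eq_false_iff_ne, ne_eq]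
          exact fun h => hwu (pv_toStr_inj h)
        simp [this, hwu]

-- B's result in the same canonical form
lemma pv_B_eq (rec_list : List (Int × Int × Int)) (unq_users : List Int) :
    get_run_mf_alt rec_list unq_users
      = (PySem.List.dedup unq_users).map
          (fun u => (PySem.Int.toStr u, (pvInner (pvSort rec_list u)).items)) := by
  simp only [get_run_mf_alt]
  rw [PySem.List.foldl_if_eq_foldl_filter]
  have hinit : (unq_users.foldl
      (fun d u => d.insert (PySem.Int.toStr u) PySem.Dict.empty) PySem.Dict.empty).items
      = (PySem.List.dedup unq_users).map
          (fun u => (PySem.Int.toStr u, (PySem.Dict.empty : PySem.Dict String Int))) := by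
    have := pv_foldl_insert_items PySem.Int.toStr (fun _ _ h => pv_toStr_inj h)
      (fun _ => (PySem.Dict.empty : PySem.Dict String Int))
      unq_users [] PySem.Dict.empty (by simp) (by simp [PySem.Dict.empty])
    rw [this, PySem.Set.update_nil_left, PySem.List.dedup_eq_ofList]
  rw [pv_foldl_modify_items
    (l := (PySem.List.sorted rec_list (fun x => x.2.2) true).filter
      (fun item => PySem.Set.contains (PySem.Set.ofList unq_users) item.1))
    (S := PySem.List.dedup unq_users)
    (G := fun _ => PySem.Dict.empty) _
    (by rw [PySem.List.dedup_eq_ofList]; exact PySem.Set.nodup_ofList unq_users)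
    (by
      intro x hx
      have := List.of_mem_filter hx
      rw [PySem.List.dedup_eq_ofList]
      simpa [PySem.Set.contains, List.contains_iff_mem] using this)
    hinit]
  rw [List.map_map]
  apply List.map_congr_left
  intro u hu
  have humem : u ∈ PySem.Set.ofList unq_users := by
    rwa [PySem.List.dedup_eq_ofList] at hu
  simp only [Function.comp_def]
  rw [List.filter_filter]
  have hcong : ((PySem.List.sorted rec_list (fun x => x.2.2) true).filter
      (fun x => x.1 == u
        && PySem.Set.contains (PySem.Set.ofList unq_users) x.1))
      = (PySem.List.sorted rec_list (fun x => x.2.2) true).filter (fun x => x.1 == u) := by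
    apply List.filter_congr
    intro x _
    by_cases hxu : x.1 = u
    · subst hxu
      simp [PySem.Set.contains, humem]
    · simp [hxu]
  rw [hcong, pv_sorted_filter, pvSort, pvInner]

-- ===== VERDICT (by name: the statement is the Claim_ definition above) =====
theorem get_run_mf_spec : Claim_equal_get_run_mf := by
  intro rec_list unq_users _
  unfold Spec_get_run_mf
  rw [pv_A_eq, pv_B_eq]
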